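-- pv_equiv track=rewrite | github.com/kuznetsovvj/education | algorithms/codeforces/1760c.py | check
-- ===== SOURCE A (Python) =====
-- def check(seq):
--     mx = [0, 0]
--     for i in seq:
--         if i > mx[0]:
--             mx[1], mx[0] = mx[0], i
--         elif i > mx[1]:
--             mx[1] = i
--     res = [0 for _ in range(len(seq))]
--     for idx, item in enumerate(seq):
--         if item != mx[0]:
--             res[idx] = item - mx[0]
--         else:
--             res[idx] = item - mx[1]
--     return ' '.join(map(str, res))
-- ===== SOURCE B (Python) =====
-- def check(seq):
--     top = sorted([0, 0] + seq, reverse=True)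
--     mx0, mx1 = top[0], top[1]
--     return ' '.join(str(x - (mx1 if x == mx0 else mx0)) for x in seq)
-- ===== Notes on version B (the rewrite author's own statement) =====
-- stated objective: simpler
-- what changed: Replaces the manual one-pass top-two scan and the zero-initialised index-assignment loop with a reverse sort of the zero-padded sequence (top two = first two elements) and a single join-over-comprehension.
import Mathlib
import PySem

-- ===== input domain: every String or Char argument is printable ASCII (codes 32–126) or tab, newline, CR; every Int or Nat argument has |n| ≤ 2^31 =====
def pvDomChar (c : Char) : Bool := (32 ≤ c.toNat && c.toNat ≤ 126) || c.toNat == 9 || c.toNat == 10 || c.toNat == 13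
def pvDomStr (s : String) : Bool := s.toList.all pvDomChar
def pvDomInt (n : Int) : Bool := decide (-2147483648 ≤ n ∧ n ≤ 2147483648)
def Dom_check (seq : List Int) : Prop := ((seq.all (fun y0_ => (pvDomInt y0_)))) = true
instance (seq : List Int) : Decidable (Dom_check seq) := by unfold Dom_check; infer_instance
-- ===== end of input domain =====

-- B replaces A's hand-written one-pass top-two scan and index-assignment loop with a
-- reverse sort of the zero-padded sequence plus one comprehension (objective: simpler).

-- ===== PORT A =====
def check (seq : List Int) : String :=
  let mx := seq.foldl (fun (mx : Int × Int) i =>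
    if i > mx.1 then (i, mx.1) else if i > mx.2 then (mx.1, i) else mx) (0, 0)
  let res0 := (PySem.List.pyRange 0 (seq.length : Int) 1).map (fun _ => (0 : Int))
  let res := (PySem.List.enumerate seq 0).foldl (fun res (p : Int × Int) =>
    PySem.List.pySetD res p.1 (if p.2 ≠ mx.1 then p.2 - mx.1 else p.2 - mx.2)) res0
  PySem.Str.join " " (res.map PySem.Int.toStr)

-- ===== PORT B =====
def check_alt (seq : List Int) : String :=
  let top := PySem.List.sorted ([0, 0] ++ seq) (fun x => x) true
  let mx0 := PySem.List.pyGetD top 0 0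
  let mx1 := PySem.List.pyGetD top 1 0
  PySem.Str.join " " (seq.map (fun x => PySem.Int.toStr (x - (if x == mx0 then mx1 else mx0))))

-- ===== PRECONDITION & SPEC =====
def Spec_check (seq : List Int) (out : String) : Prop := out = check_alt seq
instance (seq : List Int) (out : String) : Decidable (Spec_check seq out) := by unfold Spec_check; infer_instance

-- ===== CLAIM (what is proved, stated in full; the proofs are below) =====
def Claim_equal_check : Prop := ∀ (seq : List Int), Dom_check seq → Spec_check seq (check seq)

-- ===== LEMMAS AND PROOFS =====

-- A's one-pass top-two step.
def pvStep (mx : Int × Int) (i : Int) : Int × Int :=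
  if i > mx.1 then (i, mx.1) else if i > mx.2 then (mx.1, i) else mx

-- the insertion used by reverse sort with identity key
def pvIns (x : Int) (acc : List Int) : List Int :=
  PySem.List.insertBy (fun a b => decide (b < a)) x acc

-- Folding reverse-sort insertion keeps the first two elements equal to A's scan state.
lemma pv_fold_insert (l : List Int) :
    ∀ (a b : Int) (rest : List Int), ∃ rest',
      l.foldl (fun acc x => pvIns x acc) (a :: b :: rest) =
        (l.foldl pvStep (a, b)).1 :: (l.foldl pvStep (a, b)).2 :: rest' := by
  induction l with
  | nil => intro a b rest; exact ⟨rest, rfl⟩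
  | cons x l ih =>
    intro a b rest
    simp only [List.foldl_cons]
    have hins : pvIns x (a :: b :: rest) =
        if a < x then x :: a :: b :: rest
        else if b < x then a :: x :: b :: rest
        else a :: b :: pvIns x rest := by
      simp only [pvIns, PySem.List.insertBy]
      by_cases h1 : a < x
      · simp [h1]
      · by_cases h2 : b < x <;> simp [h1, h2]
    have hstep : pvStep (a, b) x =
        if a < x then (x, a) else if b < x then (a, x) else (a, b) := by
      simp [pvStep]
    by_cases h1 : a < x
    · rw [hins, hstep]; simp only [h1, if_pos]
      exact ih x a (b :: rest)
    · by_cases h2 : b < x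
      · rw [hins, hstep]; simp only [h1, h2, if_pos, if_false]
        exact ih a x (b :: rest)
      · rw [hins, hstep]; simp only [h1, h2, if_false]
        exact ih a b (pvIns x rest)

-- the reverse-sorted zero-padded list starts with exactly A's final (mx0, mx1).
lemma pv_sorted_top (seq : List Int) : ∃ rest',
    PySem.List.sorted ([0, 0] ++ seq) (fun x => x) true =
      (seq.foldl pvStep (0, 0)).1 :: (seq.foldl pvStep (0, 0)).2 :: rest' := by
  rw [PySem.List.sorted_rev_eq_foldl_insertBy]
  have : List.foldl (fun acc x => PySem.List.insertBy (fun a b => decide (b < a)) x acc)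
      [] ([0, 0] ++ seq) = seq.foldl (fun acc x => pvIns x acc) ((0:Int) :: 0 :: []) := by
    simp [pvIns, PySem.List.insertBy]
  rw [this]
  exact pv_fold_insert seq 0 0 []

-- A's write loop over enumerate equals a map.
lemma pv_write_loop (f : Int → Int) (xs : List Int) :
    ∀ (pre suf : List Int), suf.length = xs.length →
      (PySem.List.enumerate xs (pre.length : Int)).foldl
        (fun res (p : Int × Int) => PySem.List.pySetD res p.1 (f p.2)) (pre ++ suf)
      = pre ++ xs.map f := by
  induction xs with
  | nil => intro pre suf h; simp at h; simp [h, PySem.List.enumerate]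
  | cons x xs ih =>
    intro pre suf h
    cases suf with
    | nil => simp at h
    | cons z suf =>
      simp only [PySem.List.enumerate_cons, List.foldl_cons]
      have hset : PySem.List.pySetD (pre ++ z :: suf) (pre.length : Int) (f x)
          = (pre ++ [f x]) ++ suf := by
        rw [PySem.List.pySetD_natCast]
        induction pre with
        | nil => simp
        | cons p pre ihp => simp [ihp]
      rw [hset]
      have hlen : ((pre.length : Int) + 1) = (((pre ++ [f x]).length : Nat) : Int) := by
        simp
      rw [hlen, ih (pre ++ [f x]) suf (by simpa using h)]
      simp
  
-- ===== VERDICT (by name: the statement is the Claim_ definition above) =====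
theorem check_spec : Claim_equal_check := by
  intro seq _
  unfold Spec_check check check_alt
  obtain ⟨rest', htop⟩ := pv_sorted_top seq
  rw [htop]
  set m := seq.foldl pvStep (0, 0) with hm
  have hfold : seq.foldl (fun (mx : Int × Int) i =>
      if i > mx.1 then (i, mx.1) else if i > mx.2 then (mx.1, i) else mx) (0, 0) = m := rfl
  simp only [hfold]
  have hget0 : PySem.List.pyGetD (m.1 :: m.2 :: rest') 0 0 = m.1 :=
    PySem.List.pyGetD_zero_cons _ _ _
  have hget1 : PySem.List.pyGetD (m.1 :: m.2 :: rest') 1 0 = m.2 := by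
    have : ((1 : Int)) = ((1 : Nat) : Int) := rfl
    rw [this, PySem.List.pyGetD_natCast]; rfl
  rw [hget0, hget1]
  have hres0 : (PySem.List.pyRange 0 (seq.length : Int) 1).map (fun _ => (0 : Int))
      = ([] : List Int) ++ (PySem.List.pyRange 0 (seq.length : Int) 1).map (fun _ => (0 : Int)) := by simp
  have hlen : ((PySem.List.pyRange 0 (seq.length : Int) 1).map (fun _ => (0 : Int))).length
      = seq.length := by
    simp [PySem.List.length_pyRange_one]
  have hwrite := pv_write_loop
    (fun item => if item ≠ m.1 then item - m.1 else item - m.2) seq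
    [] ((PySem.List.pyRange 0 (seq.length : Int) 1).map (fun _ => (0 : Int))) hlen
  simp only [List.length_nil, Int.natCast_zero, List.nil_append] at hwrite
  rw [hwrite]
  congr 1
  rw [List.map_map]
  apply List.map_congr_left
  intro x _
  by_cases hx : x = m.1 <;> simp [hx]
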